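-- pv_equiv track=rewrite | github.com/thanosMorfo/ArtificialInteligenceLab1 | 1η Άσκηση/Chess/AlfaStar.py.py | rook_attacks
-- ===== SOURCE A (Python) =====
-- BOARD_SIZE = 5
--
-- def in_bounds(p): return 0 <= p[0] < BOARD_SIZE and 0 <= p[1] < BOARD_SIZE
--
-- def rook_attacks(wr, wk, bk):
--     if not in_bounds(wr): return set()
--     attacks = set()
--     rx,ry = wr
--     for dx,dy in [(1,0),(-1,0),(0,1),(0,-1)]:
--         x,y = rx+dx, ry+dy
--         while in_bounds((x,y)):
--             attacks.add((x,y))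
--             if (x,y) in (wk,bk): break
--             x += dx; y += dy
--     return attacks
-- ===== SOURCE B (Python) =====
-- BOARD_SIZE = 5
--
-- def in_bounds(p): return 0 <= p[0] < BOARD_SIZE and 0 <= p[1] < BOARD_SIZE
--
-- def wall_distance(rx, ry, dx, dy):
--     # distance from (rx, ry) to the last in-bounds square along direction (dx, dy)
--     if dx != 0:
--         return BOARD_SIZE - 1 - rx if dx == 1 else rx
--     return BOARD_SIZE - 1 - ry if dy == 1 else ry
--
-- def ray_squares(rx, ry, dx, dy, wk, bk):
--     # reach = min(wall distance, nearest aligned blocker distance), blocker inclusive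
--     stop = wall_distance(rx, ry, dx, dy)
--     for px, py in (wk, bk):
--         if (px - rx) * dy == (py - ry) * dx:          # collinear with the ray line
--             t = dx * (px - rx) + dy * (py - ry)       # signed distance along the ray
--             if 0 < t < stop:
--                 stop = t
--     return [(rx + t * dx, ry + t * dy) for t in range(1, stop + 1)]
--
-- def rook_attacks(wr, wk, bk):
--     # Per direction: compute the reach, then emit the whole run at once.
--     if not in_bounds(wr): return set()
--     rx, ry = wr
--     attacks = set()
--     for dx, dy in [(1,0),(-1,0),(0,1),(0,-1)]:
--         for sq in ray_squares(rx, ry, dx, dy, wk, bk):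
--             attacks.add(sq)
--     return attacks
-- ===== Notes on version B (the rewrite author's own statement) =====
-- stated objective: alternative
-- what changed: Replaces A's step-by-step walk with break tests at every square by a per-direction reach computation (min of wall distance and nearest aligned blocker distance) followed by emitting the whole run of squares at once.
import Mathlib
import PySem

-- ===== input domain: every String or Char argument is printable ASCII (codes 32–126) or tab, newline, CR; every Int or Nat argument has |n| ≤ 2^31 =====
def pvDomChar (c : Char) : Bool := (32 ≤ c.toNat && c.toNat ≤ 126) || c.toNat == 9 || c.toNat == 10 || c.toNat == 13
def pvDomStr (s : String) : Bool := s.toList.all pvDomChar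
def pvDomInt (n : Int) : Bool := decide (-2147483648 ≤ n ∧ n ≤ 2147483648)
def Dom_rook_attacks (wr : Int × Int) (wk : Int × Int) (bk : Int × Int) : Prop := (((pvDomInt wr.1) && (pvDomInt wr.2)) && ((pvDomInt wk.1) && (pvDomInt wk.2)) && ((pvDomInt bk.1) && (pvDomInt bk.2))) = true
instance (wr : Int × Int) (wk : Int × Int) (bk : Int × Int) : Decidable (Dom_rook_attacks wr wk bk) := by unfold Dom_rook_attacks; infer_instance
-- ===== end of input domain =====

-- B replaces A's scan-until-break walk with a per-direction reach computation
-- (min of wall distance and nearest aligned blocker distance) followed by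
-- emitting the whole run with range; objective: alternative decomposition.

-- ===== PORT A =====
def pvInBounds (p : Int × Int) : Bool := decide (0 ≤ p.1 ∧ p.1 < 5 ∧ 0 ≤ p.2 ∧ p.2 < 5)

-- A's while loop; fuel 5 is exact: a unit-step ray visits at most 5 in-bounds squares,
-- so the loop body runs at most 5 times before in_bounds fails.
def pvScanA (wk bk : Int × Int) (dx dy : Int) : Int → Int → List (Int × Int) → Nat → List (Int × Int)
  | _, _, acc, 0 => acc
  | x, y, acc, n+1 =>
    if pvInBounds (x, y) then
      if (x, y) = wk ∨ (x, y) = bk then PySem.Set.add acc (x, y)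
      else pvScanA wk bk dx dy (x + dx) (y + dy) (PySem.Set.add acc (x, y)) n
    else acc

def rook_attacks (wr : Int × Int) (wk : Int × Int) (bk : Int × Int) : List (Int × Int) :=
  if pvInBounds wr then
    [((1:Int),(0:Int)), (-1,0), (0,1), (0,-1)].foldl
      (fun acc d => pvScanA wk bk d.1 d.2 (wr.1 + d.1) (wr.2 + d.2) acc 5) []
  else []

-- ===== PORT B =====
def pvWall (rx ry dx dy : Int) : Int :=
  if dx ≠ 0 then (if dx = 1 then 5 - 1 - rx else rx)
  else (if dy = 1 then 5 - 1 - ry else ry)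

-- one pass of B's blocker loop: tighten stop if p lies on the ray closer than stop
def pvTighten (rx ry dx dy : Int) (stop : Int) (p : Int × Int) : Int :=
  if (p.1 - rx) * dy = (p.2 - ry) * dx then
    if 0 < dx * (p.1 - rx) + dy * (p.2 - ry) ∧ dx * (p.1 - rx) + dy * (p.2 - ry) < stop
    then dx * (p.1 - rx) + dy * (p.2 - ry) else stop
  else stop

def pvRay (rx ry dx dy : Int) (wk bk : Int × Int) : List (Int × Int) :=
  let stop := [wk, bk].foldl (fun s p => pvTighten rx ry dx dy s p) (pvWall rx ry dx dy)
  (PySem.List.pyRange 1 (stop + 1) 1).map (fun t => (rx + t * dx, ry + t * dy))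

def rook_attacks_alt (wr : Int × Int) (wk : Int × Int) (bk : Int × Int) : List (Int × Int) :=
  if pvInBounds wr then
    [((1:Int),(0:Int)), (-1,0), (0,1), (0,-1)].foldl
      (fun acc d => (pvRay wr.1 wr.2 d.1 d.2 wk bk).foldl (fun a sq => PySem.Set.add a sq) acc) []
  else []

-- ===== PRECONDITION & SPEC =====
def Spec_rook_attacks (wr : Int × Int) (wk : Int × Int) (bk : Int × Int) (out : List (Int × Int)) : Prop := out = rook_attacks_alt wr wk bk
instance (wr : Int × Int) (wk : Int × Int) (bk : Int × Int) (out : List (Int × Int)) : Decidable (Spec_rook_attacks wr wk bk out) := by unfold Spec_rook_attacks; infer_instance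

-- ===== CLAIM (what is proved, stated in full; the proofs are below) =====
def Claim_equal_rook_attacks : Prop := ∀ (wr : Int × Int) (wk : Int × Int) (bk : Int × Int), Dom_rook_attacks wr wk bk → Spec_rook_attacks wr wk bk (rook_attacks wr wk bk)

-- ===== LEMMAS AND PROOFS =====

-- the four unit directions
def pvDir (dx dy : Int) : Prop :=
  (dx = 1 ∧ dy = 0) ∨ (dx = -1 ∧ dy = 0) ∨ (dx = 0 ∧ dy = 1) ∨ (dx = 0 ∧ dy = -1)

-- B's stop value for one ray
def pvStop (rx ry dx dy : Int) (wk bk : Int × Int) : Int :=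
  pvTighten rx ry dx dy (pvTighten rx ry dx dy (pvWall rx ry dx dy) wk) bk

-- ---- arithmetic facts about the wall distance (per direction) ----

lemma pvWall_nonneg (rx ry dx dy : Int) (hd : pvDir dx dy)
    (hr : 0 ≤ rx ∧ rx < 5 ∧ 0 ≤ ry ∧ ry < 5) : 0 ≤ pvWall rx ry dx dy ∧ pvWall rx ry dx dy ≤ 4 := by
  rcases hd with ⟨h1, h2⟩ | ⟨h1, h2⟩ | ⟨h1, h2⟩ | ⟨h1, h2⟩ <;> subst h1 <;> subst h2 <;>
    simp only [pvWall] <;> norm_num <;> omega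

lemma pvInBounds_ray (rx ry dx dy t : Int) (hd : pvDir dx dy)
    (hr : 0 ≤ rx ∧ rx < 5 ∧ 0 ≤ ry ∧ ry < 5) (h1 : 1 ≤ t) (h2 : t ≤ pvWall rx ry dx dy) :
    pvInBounds (rx + t * dx, ry + t * dy) = true := by
  rcases hd with ⟨ha, hb⟩ | ⟨ha, hb⟩ | ⟨ha, hb⟩ | ⟨ha, hb⟩ <;> subst ha <;> subst hb <;>
    simp only [pvWall] at h2 <;> norm_num at h2 ⊢ <;> simp [pvInBounds] <;> omega

lemma pvOOB_wall (rx ry dx dy t : Int) (hd : pvDir dx dy)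
    (hr : 0 ≤ rx ∧ rx < 5 ∧ 0 ≤ ry ∧ ry < 5) (ht : t = pvWall rx ry dx dy + 1) :
    pvInBounds (rx + t * dx, ry + t * dy) = false := by
  rcases hd with ⟨ha, hb⟩ | ⟨ha, hb⟩ | ⟨ha, hb⟩ | ⟨ha, hb⟩ <;> subst ha <;> subst hb <;>
    simp only [pvWall] at ht <;> norm_num at ht <;> simp [pvInBounds] <;> omega

-- a point collinear with the ray at signed distance t IS the ray square at distance t
lemma pvCollinear_eq (rx ry dx dy : Int) (p : Int × Int) (hd : pvDir dx dy)
    (hc : (p.1 - rx) * dy = (p.2 - ry) * dx) :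
    p = (rx + (dx * (p.1 - rx) + dy * (p.2 - ry)) * dx, ry + (dx * (p.1 - rx) + dy * (p.2 - ry)) * dy) := by
  obtain ⟨px, py⟩ := p
  rcases hd with ⟨ha, hb⟩ | ⟨ha, hb⟩ | ⟨ha, hb⟩ | ⟨ha, hb⟩ <;> subst ha <;> subst hb <;>
    simp only [Prod.mk.injEq] at hc ⊢ <;> constructor <;> omega

-- the ray square at distance t is collinear, with signed distance t
lemma pvRaySq_collinear (rx ry dx dy t : Int) (hd : pvDir dx dy) :
    ((rx + t * dx) - rx) * dy = ((ry + t * dy) - ry) * dx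
      ∧ dx * ((rx + t * dx) - rx) + dy * ((ry + t * dy) - ry) = t := by
  rcases hd with ⟨ha, hb⟩ | ⟨ha, hb⟩ | ⟨ha, hb⟩ | ⟨ha, hb⟩ <;> subst ha <;> subst hb <;>
    constructor <;> ring

-- ---- facts about pvTighten / pvStop ----

lemma pvTighten_le (rx ry dx dy s : Int) (p : Int × Int) : pvTighten rx ry dx dy s p ≤ s := by
  unfold pvTighten; split_ifs with h1 h2
  · exact le_of_lt h2.2
  · exact le_refl s
  · exact le_refl s

lemma pvTighten_nonneg (rx ry dx dy s : Int) (p : Int × Int) (hs : 0 ≤ s) :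
    0 ≤ pvTighten rx ry dx dy s p := by
  unfold pvTighten; split_ifs with h1 h2
  · exact le_of_lt h2.1
  · exact hs
  · exact hs

lemma pvTighten_le_t (rx ry dx dy s : Int) (p : Int × Int)
    (hc : (p.1 - rx) * dy = (p.2 - ry) * dx) (ht : 0 < dx * (p.1 - rx) + dy * (p.2 - ry)) :
    pvTighten rx ry dx dy s p ≤ dx * (p.1 - rx) + dy * (p.2 - ry) := by
  unfold pvTighten; split_ifs with h1 h2 <;> omega

lemma pvTighten_cases (rx ry dx dy s : Int) (p : Int × Int) :
    pvTighten rx ry dx dy s p = s ∨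
      ((p.1 - rx) * dy = (p.2 - ry) * dx ∧ 0 < dx * (p.1 - rx) + dy * (p.2 - ry)
        ∧ pvTighten rx ry dx dy s p = dx * (p.1 - rx) + dy * (p.2 - ry)) := by
  unfold pvTighten; split_ifs with h1 h2
  · exact Or.inr ⟨h1, h2.1, rfl⟩
  · exact Or.inl rfl
  · exact Or.inl rfl

lemma pvStop_le_wall (rx ry dx dy : Int) (wk bk : Int × Int) :
    pvStop rx ry dx dy wk bk ≤ pvWall rx ry dx dy :=
  le_trans (pvTighten_le ..) (pvTighten_le ..)

lemma pvStop_nonneg (rx ry dx dy : Int) (wk bk : Int × Int) (hw : 0 ≤ pvWall rx ry dx dy) :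
    0 ≤ pvStop rx ry dx dy wk bk :=
  pvTighten_nonneg _ _ _ _ _ _ (pvTighten_nonneg _ _ _ _ _ _ hw)

-- the stop never undercuts a positive aligned blocker distance
lemma pvStop_le_t (rx ry dx dy : Int) (wk bk p : Int × Int) (hp : p = wk ∨ p = bk)
    (hc : (p.1 - rx) * dy = (p.2 - ry) * dx) (ht : 0 < dx * (p.1 - rx) + dy * (p.2 - ry)) :
    pvStop rx ry dx dy wk bk ≤ dx * (p.1 - rx) + dy * (p.2 - ry) := by
  unfold pvStop
  rcases hp with rfl | rfl
  · exact le_trans (pvTighten_le ..) (pvTighten_le_t _ _ _ _ _ _ hc ht)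
  · exact pvTighten_le_t _ _ _ _ _ _ hc ht

-- if the stop is strictly inside the wall, it is an aligned blocker distance
lemma pvStop_blocker (rx ry dx dy : Int) (wk bk : Int × Int)
    (hd : pvDir dx dy) (h : pvStop rx ry dx dy wk bk < pvWall rx ry dx dy) :
    (rx + pvStop rx ry dx dy wk bk * dx, ry + pvStop rx ry dx dy wk bk * dy) = wk ∨
    (rx + pvStop rx ry dx dy wk bk * dx, ry + pvStop rx ry dx dy wk bk * dy) = bk := by
  rcases pvTighten_cases rx ry dx dy (pvTighten rx ry dx dy (pvWall rx ry dx dy) wk) bk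
    with he | ⟨hc, ht, he⟩
  · rcases pvTighten_cases rx ry dx dy (pvWall rx ry dx dy) wk with he2 | ⟨hc, ht, he2⟩
    · exfalso
      unfold pvStop at h
      rw [he, he2] at h
      exact absurd h (lt_irrefl _)
    · left
      have hw := pvCollinear_eq rx ry dx dy wk hd hc
      unfold pvStop
      rw [he, he2]
      exact hw.symm
  · right
    have hw := pvCollinear_eq rx ry dx dy bk hd hc
    unfold pvStop
    rw [he]
    exact hw.symm

-- if the stop is strictly inside the wall it is a positive blocker distance
lemma pvStop_pos_of_lt_wall (rx ry dx dy : Int) (wk bk : Int × Int)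
    (h : pvStop rx ry dx dy wk bk < pvWall rx ry dx dy) : 0 < pvStop rx ry dx dy wk bk := by
  rcases pvTighten_cases rx ry dx dy (pvTighten rx ry dx dy (pvWall rx ry dx dy) wk) bk
    with he | ⟨hc, ht, he⟩
  · rcases pvTighten_cases rx ry dx dy (pvWall rx ry dx dy) wk with he2 | ⟨hc, ht, he2⟩
    · exfalso
      unfold pvStop at h
      rw [he, he2] at h
      exact absurd h (lt_irrefl _)
    · unfold pvStop; omega
  · unfold pvStop; omega

lemma pvScan_oob (wk bk : Int × Int) (dx dy x y : Int) (acc : List (Int × Int)) (n : Nat)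
    (h : pvInBounds (x, y) = false) : pvScanA wk bk dx dy x y acc n = acc := by
  cases n with
  | zero => rfl
  | succ m => simp only [pvScanA]; rw [if_neg (by simp [h])]

-- ---- the main per-ray loop invariant ----
lemma pvLoop (wk bk : Int × Int) (rx ry dx dy : Int) (hd : pvDir dx dy)
    (hr : 0 ≤ rx ∧ rx < 5 ∧ 0 ≤ ry ∧ ry < 5) :
    ∀ (n : Nat) (t : Int) (acc : List (Int × Int)), 1 ≤ t → t ≤ pvStop rx ry dx dy wk bk →
      pvStop rx ry dx dy wk bk + 1 - t ≤ (n : Int) →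
      pvScanA wk bk dx dy (rx + t * dx) (ry + t * dy) acc n =
        (PySem.List.pyRange t (pvStop rx ry dx dy wk bk + 1) 1).foldl
          (fun a u => PySem.Set.add a (rx + u * dx, ry + u * dy)) acc := by
  intro n
  induction n with
  | zero =>
    intro t acc h1 h2 h3
    exfalso
    simp only [Nat.cast_zero] at h3
    omega
  | succ m ih =>
    intro t acc h1 h2 h3
    have hwle := pvStop_le_wall rx ry dx dy wk bk
    have hin : pvInBounds (rx + t * dx, ry + t * dy) = true :=
      pvInBounds_ray rx ry dx dy t hd hr h1 (by omega)
    simp only [pvScanA]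
    rw [if_pos hin]
    by_cases hbreak : (rx + t * dx, ry + t * dy) = wk ∨ (rx + t * dx, ry + t * dy) = bk
    · rw [if_pos hbreak]
      obtain ⟨hc, hdist⟩ := pvRaySq_collinear rx ry dx dy t hd
      have hts : pvStop rx ry dx dy wk bk ≤ t := by
        have := pvStop_le_t rx ry dx dy wk bk (rx + t * dx, ry + t * dy) hbreak hc
          (by rw [hdist]; omega)
        rw [hdist] at this
        exact this
      have hteq : t = pvStop rx ry dx dy wk bk := le_antisymm h2 hts
      rw [← hteq, PySem.List.pyRange_one_singleton, List.foldl_cons, List.foldl_nil]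
    · rw [if_neg hbreak]
      have hx : rx + t * dx + dx = rx + (t + 1) * dx := by ring
      have hy : ry + t * dy + dy = ry + (t + 1) * dy := by ring
      rw [hx, hy, PySem.List.pyRange_one_cons (by omega), List.foldl_cons]
      by_cases hlt : t < pvStop rx ry dx dy wk bk
      · exact ih (t + 1) _ (by omega) (by omega) (by push_cast at h3 ⊢; omega)
      · have hteq : t = pvStop rx ry dx dy wk bk := by omega
        have hwall : pvStop rx ry dx dy wk bk = pvWall rx ry dx dy := by
          by_contra hne
          have hlt2 : pvStop rx ry dx dy wk bk < pvWall rx ry dx dy :=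
            lt_of_le_of_ne hwle hne
          have := pvStop_blocker rx ry dx dy wk bk hd hlt2
          rw [← hteq] at this
          exact hbreak this
        have hoob : pvInBounds (rx + (t + 1) * dx, ry + (t + 1) * dy) = false :=
          pvOOB_wall rx ry dx dy (t + 1) hd hr (by omega)
        rw [pvScan_oob wk bk dx dy _ _ _ m hoob,
            PySem.List.pyRange_one_eq_nil (by omega), List.foldl_nil]

lemma pvRayEq (wk bk : Int × Int) (rx ry dx dy : Int) (hd : pvDir dx dy)
    (hr : 0 ≤ rx ∧ rx < 5 ∧ 0 ≤ ry ∧ ry < 5) (acc : List (Int × Int)) :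
    pvScanA wk bk dx dy (rx + dx) (ry + dy) acc 5 =
      (pvRay rx ry dx dy wk bk).foldl (fun a sq => PySem.Set.add a sq) acc := by
  have hfold : [wk, bk].foldl (fun s p => pvTighten rx ry dx dy s p) (pvWall rx ry dx dy)
      = pvStop rx ry dx dy wk bk := rfl
  have hw := pvWall_nonneg rx ry dx dy hd hr
  have hs0 := pvStop_nonneg rx ry dx dy wk bk hw.1
  have hwle := pvStop_le_wall rx ry dx dy wk bk
  unfold pvRay
  simp only [hfold, List.foldl_map]
  have hx : rx + dx = rx + 1 * dx := by ring
  have hy : ry + dy = ry + 1 * dy := by ring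
  by_cases hpos : 1 ≤ pvStop rx ry dx dy wk bk
  · rw [hx, hy]
    exact pvLoop wk bk rx ry dx dy hd hr 5 1 acc le_rfl hpos (by push_cast; omega)
  · have hz : pvStop rx ry dx dy wk bk = 0 := by omega
    have hwall : pvStop rx ry dx dy wk bk = pvWall rx ry dx dy := by
      by_contra hne
      have := pvStop_pos_of_lt_wall rx ry dx dy wk bk (lt_of_le_of_ne hwle hne)
      omega
    have hoob : pvInBounds (rx + 1 * dx, ry + 1 * dy) = false :=
      pvOOB_wall rx ry dx dy 1 hd hr (by omega)
    rw [hx, hy, pvScan_oob wk bk dx dy _ _ _ 5 hoob,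
        PySem.List.pyRange_one_eq_nil (by omega), List.foldl_nil]

-- ===== VERDICT (by name: the statement is the Claim_ definition above) =====
theorem rook_attacks_spec : Claim_equal_rook_attacks := by
  intro wr wk bk _
  unfold Spec_rook_attacks
  by_cases hb : pvInBounds wr = true
  · have hr : 0 ≤ wr.1 ∧ wr.1 < 5 ∧ 0 ≤ wr.2 ∧ wr.2 < 5 := by
      simpa [pvInBounds] using hb
    unfold rook_attacks rook_attacks_alt
    rw [if_pos hb, if_pos hb]
    simp only [List.foldl]
    rw [pvRayEq wk bk wr.1 wr.2 1 0 (by left; exact ⟨rfl, rfl⟩) hr,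
        pvRayEq wk bk wr.1 wr.2 (-1) 0 (by right; left; exact ⟨rfl, rfl⟩) hr,
        pvRayEq wk bk wr.1 wr.2 0 1 (by right; right; left; exact ⟨rfl, rfl⟩) hr,
        pvRayEq wk bk wr.1 wr.2 0 (-1) (by right; right; right; exact ⟨rfl, rfl⟩) hr]
  · unfold rook_attacks rook_attacks_alt
    rw [if_neg hb, if_neg hb]
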